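-- pv_equiv track=rewrite | github.com/Alekslisk/yandex_contest | Основы Python/Базовые конструкции Python/Вложенные циклы/R.py | x_mas_matrix
-- ===== SOURCE A (Python) =====
-- def x_mas_matrix(n):
--     num = 1
--     current_level = 1
--     x_matrix = []
--
--     while n > 0:
--         count = min(current_level, n)
--
--         level = " ".join(str(num + i) for i in range(count))
--
--         x_matrix.append(level)
--
--         n -= count
--         num += count
--         current_level += 1
--     return x_matrix
-- ===== SOURCE B (Python) =====
-- def x_mas_matrix(n):
--     words = [str(i) for i in range(1, n + 1)]
--     bounds = []
--     b, k = 0, 1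
--     while b < len(words):
--         bounds.append(b)
--         b += k
--         k += 1
--     bounds.append(len(words))
--     return [" ".join(words[lo:hi]) for lo, hi in zip(bounds, bounds[1:])]
-- ===== Notes on version B (the rewrite author's own statement) =====
-- stated objective: alternative
-- what changed: B is staged: it first materializes all n numbers as a flat list of strings, then computes the list of row boundary offsets (cumulative triangular positions capped at n), and finally emits the rows in a separate pass by slicing the flat list between consecutive boundaries via zip(bounds, bounds[1:]), instead of A's single loop that builds each row directly from threaded counters num and n.
import Mathlib
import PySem

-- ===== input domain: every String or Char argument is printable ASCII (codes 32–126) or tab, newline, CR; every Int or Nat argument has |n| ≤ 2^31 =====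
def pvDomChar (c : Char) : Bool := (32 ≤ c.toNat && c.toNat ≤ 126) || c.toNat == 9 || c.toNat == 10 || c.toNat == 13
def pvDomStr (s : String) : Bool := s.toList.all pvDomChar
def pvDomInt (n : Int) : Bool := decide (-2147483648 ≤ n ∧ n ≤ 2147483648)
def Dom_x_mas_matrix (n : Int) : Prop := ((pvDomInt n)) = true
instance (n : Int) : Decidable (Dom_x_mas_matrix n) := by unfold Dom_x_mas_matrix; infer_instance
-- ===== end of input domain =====

-- B is staged: all numbers are materialized as strings once, row boundary offsets are computed
-- as a list, and rows are produced by slicing between consecutive boundaries; objective: alternative.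

-- ===== PORT A =====
-- A's while-loop over state (n, num, current_level); the Nat fuel (n.toNat at entry) is only a
-- totality device: each iteration consumes min(current_level, n) ≥ 1, so n.toNat steps suffice.
def xmasLoopA : Nat → Int → Int → Int → List String
  | 0, _, _, _ => []
  | fuel + 1, n, num, level =>
    if 0 < n then
      (PySem.Str.join " " ((PySem.List.pyRange 0 (min level n) 1).map
          (fun i => PySem.Int.toStr (num + i))))
        :: xmasLoopA fuel (n - min level n) (num + min level n) (level + 1)
    else []

def x_mas_matrix (n : Int) : List String := xmasLoopA n.toNat n 1 1

-- ===== PORT B =====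
-- words = [str(i) for i in range(1, n+1)]
def pvWords (n : Int) : List String :=
  (PySem.List.pyRange 1 (n + 1) 1).map PySem.Int.toStr

-- the 'while b < len(words)' boundary loop over state (b, k); fuel len(words) is only a totality
-- device: b grows by k ≥ 1 each turn, so len(words) steps always suffice.
def pvBoundsLoop : Nat → Int → Int → Int → List Int
  | 0, _, _, _ => []
  | fuel + 1, b, k, len =>
    if b < len then b :: pvBoundsLoop fuel (b + k) (k + 1) len else []

def x_mas_matrix_alt (n : Int) : List String :=
  let words := pvWords n
  let bounds := pvBoundsLoop words.length 0 1 (words.length : Int) ++ [((words.length : Nat) : Int)]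
  (bounds.zip (PySem.List.slice bounds (some 1) none)).map
    (fun p => PySem.Str.join " " (PySem.List.slice words (some p.1) (some p.2)))

-- ===== PRECONDITION & SPEC =====
def Spec_x_mas_matrix (n : Int) (out : List String) : Prop := out = x_mas_matrix_alt n
instance (n : Int) (out : List String) : Decidable (Spec_x_mas_matrix n out) := by unfold Spec_x_mas_matrix; infer_instance

-- ===== CLAIM =====
def Claim_equal_x_mas_matrix : Prop := ∀ (n : Int), Dom_x_mas_matrix n → Spec_x_mas_matrix n (x_mas_matrix n)

-- ===== LEMMAS AND PROOFS =====

-- row emission over a boundary list, as B does it: consecutive pairs, slice, join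
def pvRows (n : Int) (bs : List Int) : List String :=
  (bs.zip bs.tail).map (fun p => PySem.Str.join " " (PySem.List.slice (pvWords n) (some p.1) (some p.2)))

theorem pvRows_cons (n : Int) (x h : Int) (t : List Int) :
    pvRows n (x :: h :: t) =
      PySem.Str.join " " (PySem.List.slice (pvWords n) (some x) (some h)) :: pvRows n (h :: t) := by
  simp [pvRows]

theorem alt_eq_rows (n : Int) :
    x_mas_matrix_alt n =
      pvRows n (pvBoundsLoop (pvWords n).length 0 1 ((pvWords n).length : Int) ++ [((pvWords n).length : Int)]) := by
  simp [x_mas_matrix_alt, pvRows, PySem.List.slice_from_one]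

theorem pvWords_length (n : Int) : (pvWords n).length = n.toNat := by
  simp [pvWords, PySem.List.pyRange_one]

-- the slice of the flat word list between b and b+c is exactly one of A's rows
theorem pvSlice_row (n b c : Int) (hb : 0 ≤ b) (hc : 0 ≤ c) (hbc : b + c ≤ n) :
    PySem.List.slice (pvWords n) (some b) (some (b + c)) =
      (PySem.List.pyRange 0 c 1).map (fun i => PySem.Int.toStr (b + 1 + i)) := by
  rw [PySem.List.slice_toNat _ hb (by omega)]
  apply List.ext_getElem
  · simp [pvWords, PySem.List.pyRange_one]
    omega
  · intro j h1 h2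
    have hj : j < c.toNat := by
      simpa [PySem.List.length_pyRange_one] using h2
    have hjn : b.toNat + j < n.toNat := by omega
    simp only [List.getElem_take, List.getElem_drop, pvWords, List.getElem_map,
      PySem.List.getElem_pyRange_one]
    congr 1
    have : ((pvWords n).length) = n.toNat := pvWords_length n
    push_cast
    omega

theorem loopA_nil (f : Nat) (n num level : Int) (h : ¬ 0 < n) :
    xmasLoopA f n num level = [] := by
  cases f <;> simp [xmasLoopA, h]

theorem boundsLoop_nil (f : Nat) (b k len : Int) (h : ¬ b < len) :
    pvBoundsLoop f b k len = [] := by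
  cases f <;> simp [pvBoundsLoop, h]

-- main invariant: B's boundary list starting from offset b at level k, closed with len,
-- emits exactly what A's loop emits from the corresponding state (n - b, b + 1, k)
theorem pvLoop_eq (n : Int) : ∀ (fb fa : Nat) (b k : Int), 0 ≤ b → 1 ≤ k →
    ((n.toNat : Int) - b).toNat ≤ fb → (n - b).toNat ≤ fa →
    pvRows n (pvBoundsLoop fb b k (n.toNat : Int) ++ [(n.toNat : Int)]) =
      xmasLoopA fa (n - b) (b + 1) k := by
  intro fb
  induction fb with
  | zero =>
    intro fa b k hb hk hfb _
    have hbl : ¬ b < (n.toNat : Int) := by omega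
    rw [boundsLoop_nil 0 b k _ hbl, loopA_nil fa _ _ _ (by omega)]
    simp [pvRows]
  | succ f ih =>
    intro fa b k hb hk hfb hfa
    by_cases hbl : b < (n.toNat : Int)
    · -- loop body runs: n > 0 here, so (n.toNat : Int) = n
      have hn : (n.toNat : Int) = n := by omega
      have hm : 0 < n - b := by omega
      obtain ⟨fa', rfl⟩ : ∃ fa', fa = fa' + 1 := ⟨fa - 1, by omega⟩
      simp only [pvBoundsLoop, if_pos hbl, List.cons_append]
      rw [show xmasLoopA (fa' + 1) (n - b) (b + 1) k =
            (PySem.Str.join " " ((PySem.List.pyRange 0 (min k (n - b)) 1).map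
              (fun i => PySem.Int.toStr (b + 1 + i))))
            :: xmasLoopA fa' (n - b - min k (n - b)) (b + 1 + min k (n - b)) (k + 1) from by
          simp only [xmasLoopA, if_pos hm]]
      by_cases hk2 : b + k < (n.toNat : Int)
      · -- next boundary b + k is emitted: this row is a full level of length k
        obtain ⟨f', rfl⟩ : ∃ f', f = f' + 1 := ⟨f - 1, by omega⟩
        have hunf : pvBoundsLoop (f' + 1) (b + k) (k + 1) ((n.toNat : Int)) =
            (b + k) :: pvBoundsLoop f' (b + k + (k + 1)) (k + 1 + 1) ((n.toNat : Int)) := by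
          simp only [pvBoundsLoop, if_pos hk2]
        rw [hunf, List.cons_append, pvRows_cons, ← List.cons_append, ← hunf]
        have hmin : min k (n - b) = k := by omega
        rw [hmin]
        rw [ih fa' (b + k) (k + 1) (by omega) (by omega) (by omega) (by omega)]
        rw [pvSlice_row n b k hb (by omega) (by omega),
          show n - (b + k) = n - b - k from by ring, show b + k + 1 = b + 1 + k from by ring]
      · -- last row: the remaining boundary list is just len, the row runs to the end
        rw [boundsLoop_nil f (b + k) (k + 1) _ hk2, List.nil_append]
        rw [pvRows_cons]
        have hmin : min k (n - b) = n - b := by omega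
        rw [show ((n.toNat : Int)) = b + min k (n - b) from by omega]
        rw [pvSlice_row n b (min k (n - b)) hb (by omega) (by omega)]
        rw [loopA_nil fa' _ _ _ (by omega)]
        simp [pvRows]
    · rw [boundsLoop_nil (f+1) b k _ hbl, loopA_nil fa _ _ _ (by omega)]
      simp [pvRows]

-- ===== VERDICT =====
theorem x_mas_matrix_spec : Claim_equal_x_mas_matrix := by
  intro n _
  unfold Spec_x_mas_matrix x_mas_matrix
  rw [alt_eq_rows, pvWords_length]
  rw [pvLoop_eq n n.toNat n.toNat 0 1 le_rfl le_rfl (by omega) (by omega)]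
  norm_num
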